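-- pv_equiv track=rewrite | github.com/priban42/KAB_semestral_project | utils.py | text_is_english_fast
-- ===== SOURCE A (Python) =====
-- def text_is_english_fast(text: str, words_set:set, words_set_extended:set):
--     count = 0
--     word = ""
--     best = 0
--     for c in text + " ":
--         word += c
--         if word not in words_set_extended:
--             count += best**2
--             best = 0
--             word = ""
--         if word in words_set:
--             best = len(word)
--     return count
-- ===== SOURCE B (Python) =====
-- def text_is_english_fast(text: str, words_set: set, words_set_extended: set):
--     # Build a trie over all prefixes of the extended words; each node caches
--     # membership of its prefix in both sets and the prefix length, so the main
--     # scan advances one node per character instead of re-hashing a growing string.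
--     # node = [in_extended, in_set, depth, children]
--     def new_node(p):
--         return [p in words_set_extended, p in words_set, len(p), {}]
--     root = new_node("")
--     for w in words_set_extended:
--         node = root
--         p = ""
--         for c in w:
--             p = p + c
--             child = node[3].get(c)
--             if child is None:
--                 child = new_node(p)
--             node[3][c] = child
--             node = child
--     count = 0
--     best = 0
--     node = root
--     for c in text + " ":
--         child = node[3].get(c)
--         if child is None or not child[0]:
--             count += best * best
--             best = 0
--             node = root
--         else:
--             node = child
--             if node[1]:
--                 best = node[2]
--     return count
-- ===== Notes on version B (the rewrite author's own statement) =====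
-- stated objective: alternative
-- what changed: B precomputes a trie over the extended word set (each node caching membership in both sets and its depth) and advances one trie node per character, instead of A's per-character membership tests on a growing string.
import Mathlib
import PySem

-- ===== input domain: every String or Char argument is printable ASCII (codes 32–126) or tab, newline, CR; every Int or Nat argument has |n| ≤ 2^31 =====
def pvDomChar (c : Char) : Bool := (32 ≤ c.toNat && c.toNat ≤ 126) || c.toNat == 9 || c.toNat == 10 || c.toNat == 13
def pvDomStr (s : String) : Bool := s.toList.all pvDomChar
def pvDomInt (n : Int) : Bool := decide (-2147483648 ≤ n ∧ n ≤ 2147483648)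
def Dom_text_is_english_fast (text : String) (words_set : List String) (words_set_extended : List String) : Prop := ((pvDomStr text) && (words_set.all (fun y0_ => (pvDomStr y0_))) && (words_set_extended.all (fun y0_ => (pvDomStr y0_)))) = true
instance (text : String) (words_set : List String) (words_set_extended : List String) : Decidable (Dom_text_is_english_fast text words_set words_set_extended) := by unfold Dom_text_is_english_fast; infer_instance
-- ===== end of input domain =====

-- B replaces A's per-character membership tests on a growing string by a single walk
-- through a trie built once over the extended word set (one node per character).

-- ===== PORT A =====
-- one iteration of A's `for c in text + " "` loop over state (count, word, best)
def stepA (words_set words_set_extended : List String) (st : Int × List Char × Int) (c : Char) : Int × List Char × Int :=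
  let count := st.1
  let word := st.2.1 ++ [c]
  let st2 : Int × List Char × Int :=
    if String.ofList word ∉ words_set_extended then
      (count + st.2.2 ^ 2, ([] : List Char), 0)
    else (count, word, st.2.2)
  let best := if String.ofList st2.2.1 ∈ words_set then ((st2.2.1).length : Int) else st2.2.2
  (st2.1, st2.2.1, best)

def text_is_english_fast (text : String) (words_set : List String) (words_set_extended : List String) : Int :=
  ((text.toList ++ [' ']).foldl (stepA words_set words_set_extended) (0, ([] : List Char), 0)).1

-- ===== PORT B =====
-- trie node: (in_extended, in_set, depth, children); children as an explicit list type
mutual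
inductive Trie : Type where
  | mk : Bool → Bool → Int → TrieKids → Trie
deriving DecidableEq, Repr
inductive TrieKids : Type where
  | nil : TrieKids
  | cons : Char → Trie → TrieKids → TrieKids
deriving DecidableEq, Repr
end

def Trie.inExt : Trie → Bool | .mk e _ _ _ => e
def Trie.inSet : Trie → Bool | .mk _ s _ _ => s
def Trie.depth : Trie → Int | .mk _ _ d _ => d
def Trie.kids : Trie → TrieKids | .mk _ _ _ k => k

def getKid : TrieKids → Char → Option Trie
  | .nil, _ => none
  | .cons c' t k, c => if c' = c then some t else getKid k c

def setKid : TrieKids → Char → Trie → TrieKids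
  | .nil, c, t => .cons c t .nil
  | .cons c' t' k, c, t => if c' = c then .cons c' t k else .cons c' t' (setKid k c t)

-- `new_node(p)` of Source B
def newNode (words_set words_set_extended : List String) (p : List Char) : Trie :=
  .mk (decide (String.ofList p ∈ words_set_extended)) (decide (String.ofList p ∈ words_set))
      (p.length : Int) .nil

-- the inner `for c in w` insertion loop of Source B
def insertAux (words_set words_set_extended : List String) : List Char → List Char → Trie → Trie
  | _, [], t => t
  | p, c :: cs, .mk e s d k =>
      let p' := p ++ [c]
      let child := match getKid k c with
        | some t => t
        | none => newNode words_set words_set_extended p'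
      .mk e s d (setKid k c (insertAux words_set words_set_extended p' cs child))

-- the `for w in words_set_extended` build loop of Source B
def buildTrie (words_set words_set_extended : List String) : Trie :=
  words_set_extended.foldl (fun t w => insertAux words_set words_set_extended [] w.toList t)
    (newNode words_set words_set_extended [])

-- one iteration of Source B's `for c in text + " "` loop over state (count, node, best)
def stepB (root : Trie) (st : Int × Trie × Int) (c : Char) : Int × Trie × Int :=
  match getKid st.2.1.kids c with
  | none => (st.1 + st.2.2 * st.2.2, root, 0)
  | some child =>
      if !child.inExt then (st.1 + st.2.2 * st.2.2, root, 0)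
      else (st.1, child, if child.inSet then child.depth else st.2.2)

def text_is_english_fast_alt (text : String) (words_set : List String) (words_set_extended : List String) : Int :=
  let root := buildTrie words_set words_set_extended
  ((text.toList ++ [' ']).foldl (stepB root) (0, root, 0)).1

-- ===== PRECONDITION & SPEC =====
def Spec_text_is_english_fast (text : String) (words_set : List String) (words_set_extended : List String) (out : Int) : Prop := out = text_is_english_fast_alt text words_set words_set_extended
instance (text : String) (words_set : List String) (words_set_extended : List String) (out : Int) : Decidable (Spec_text_is_english_fast text words_set words_set_extended out) := by unfold Spec_text_is_english_fast; infer_instance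

-- ===== CLAIM (what is proved, stated in full; the proofs are below) =====
def Claim_equal_text_is_english_fast : Prop := ∀ (text : String) (words_set : List String) (words_set_extended : List String), Dom_text_is_english_fast text words_set words_set_extended → Spec_text_is_english_fast text words_set words_set_extended (text_is_english_fast text words_set words_set_extended)

-- ===== LEMMAS AND PROOFS =====

-- walk the trie along a list of characters (proof device)
def lookupT : Trie → List Char → Option Trie
  | t, [] => some t
  | .mk _ _ _ k, c :: cs =>
      match getKid k c with
      | some t' => lookupT t' cs
      | none => none

-- a trie is Good for path p when every node's cached data is the membership data of its path
inductive GoodT (ws ext : List String) : List Char → Trie → Prop where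
  | mk : ∀ (p : List Char) (e s : Bool) (d : Int) (k : TrieKids),
      e = decide (String.ofList p ∈ ext) → s = decide (String.ofList p ∈ ws) → d = (p.length : Int) →
      (∀ c t, getKid k c = some t → GoodT ws ext (p ++ [c]) t) →
      GoodT ws ext p (.mk e s d k)

theorem getKid_setKid : ∀ (k : TrieKids) (c c' : Char) (t : Trie),
    getKid (setKid k c t) c' = if c' = c then some t else getKid k c'
  | .nil, c, c', t => by
      by_cases h : c' = c
      · simp [setKid, getKid, h]
      · have h2 : ¬(c = c') := fun e => h e.symm
        simp [setKid, getKid, h, h2]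
  | .cons c0 t0 k0, c, c', t => by
      by_cases h0 : c0 = c
      · subst h0
        by_cases h : c' = c0
        · simp [setKid, getKid, h]
        · have h2 : ¬(c0 = c') := fun e => h e.symm
          simp [setKid, getKid, h, h2]
      · by_cases h : c0 = c'
        · subst h
          simp [setKid, getKid, h0]
        · simp [setKid, getKid, h0, h, getKid_setKid k0 c c' t]

theorem goodT_newNode (ws ext : List String) (p : List Char) :
    GoodT ws ext p (newNode ws ext p) := by
  refine GoodT.mk p _ _ _ _ rfl rfl rfl ?_
  intro c t h; simp [getKid] at h

theorem insertAux_good (ws ext : List String) :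
    ∀ (cs p : List Char) (t : Trie), GoodT ws ext p t →
      GoodT ws ext p (insertAux ws ext p cs t) := by
  intro cs
  induction cs with
  | nil => intro p t h; simpa [insertAux] using h
  | cons c cs ih =>
      intro p t h
      cases h with
      | mk _ e s d k he hs hd hk =>
        simp only [insertAux]
        refine GoodT.mk p e s d _ he hs hd ?_
        intro c' t' h'
        rw [getKid_setKid] at h'
        by_cases hc : c' = c
        · subst hc
          simp at h'
          subst h'
          refine ih (p ++ [c']) _ ?_
          cases hgk : getKid k c' with
          | some t0 => simpa [hgk] using hk c' t0 hgk
          | none => simpa [hgk] using goodT_newNode ws ext (p ++ [c'])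
        · rw [if_neg hc] at h'
          exact hk c' t' h'

theorem lookupT_good (ws ext : List String) :
    ∀ (cs p : List Char) (t : Trie), GoodT ws ext p t →
      ∀ t', lookupT t cs = some t' → GoodT ws ext (p ++ cs) t' := by
  intro cs
  induction cs with
  | nil => intro p t h t' h'; simp [lookupT] at h'; subst h'; simpa using h
  | cons c cs ih =>
      intro p t h t' h'
      cases h with
      | mk _ e s d k he hs hd hk =>
        simp only [lookupT] at h'
        cases hgk : getKid k c with
        | none => rw [hgk] at h'; cases h'
        | some t0 =>
            rw [hgk] at h'
            have := ih (p ++ [c]) t0 (hk c t0 hgk) t' h'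
            simpa using this

theorem lookupT_append_singleton :
    ∀ (q : List Char) (t : Trie) (c : Char),
      lookupT t (q ++ [c]) = (lookupT t q).bind (fun t' => getKid t'.kids c) := by
  intro q
  induction q with
  | nil =>
      intro t c
      cases t with
      | mk e s d k =>
        simp only [List.nil_append, lookupT, Option.bind]
        cases h : getKid k c <;> simp [Trie.kids, h]
  | cons c0 q ih =>
      intro t c
      cases t with
      | mk e s d k =>
        simp only [List.cons_append, lookupT]
        cases h : getKid k c0 <;> simp [ih]

theorem insertAux_lookup_isSome (ws ext : List String) :
    ∀ (q cs p : List Char) (t : Trie), q <+: cs →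
      (lookupT (insertAux ws ext p cs t) q).isSome := by
  intro q
  induction q with
  | nil => intro cs p t _; cases insertAux ws ext p cs t <;> simp [lookupT]
  | cons c q ih =>
      intro cs p t hpre
      obtain ⟨r, hr⟩ := hpre
      cases cs with
      | nil => cases hr
      | cons c0 cs0 =>
          cases hr
          cases t with
          | mk e s d k =>
            simp only [insertAux, lookupT, getKid_setKid]
            exact ih _ _ _ ⟨r, rfl⟩

theorem insertAux_preserves_isSome (ws ext : List String) :
    ∀ (q cs p : List Char) (t : Trie), (lookupT t q).isSome →
      (lookupT (insertAux ws ext p cs t) q).isSome := by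
  intro q
  induction q with
  | nil => intro cs p t _; cases insertAux ws ext p cs t <;> simp [lookupT]
  | cons c q ih =>
      intro cs p t h
      cases t with
      | mk e s d k =>
        simp only [lookupT] at h
        cases hgk : getKid k c with
        | none => rw [hgk] at h; simp at h
        | some t0 =>
            rw [hgk] at h
            cases cs with
            | nil => simp only [insertAux, lookupT, hgk]; exact h
            | cons c0 cs0 =>
                simp only [insertAux, lookupT, getKid_setKid]
                by_cases hc : c = c0
                · subst hc
                  rw [if_pos rfl]
                  exact ih cs0 _ _ (by rw [hgk]; exact h)
                · rw [if_neg hc, hgk]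
                  exact h

theorem foldl_insert_preserves_isSome (ws ext : List String) :
    ∀ (l : List String) (t : Trie) (q : List Char), (lookupT t q).isSome →
      (lookupT (l.foldl (fun t w => insertAux ws ext [] w.toList t) t) q).isSome := by
  intro l
  induction l with
  | nil => intro t q h; simpa using h
  | cons w l ih =>
      intro t q h
      exact ih _ q (insertAux_preserves_isSome ws ext q w.toList [] t h)

theorem foldl_insert_presence (ws ext : List String) :
    ∀ (l : List String) (t : Trie) (w : String) (q : List Char), w ∈ l → q <+: w.toList →
      (lookupT (l.foldl (fun t w => insertAux ws ext [] w.toList t) t) q).isSome := by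
  intro l
  induction l with
  | nil => intro t w q h; cases h
  | cons w0 l ih =>
      intro t w q hmem hpre
      rcases List.mem_cons.mp hmem with h | h
      · subst h
        exact foldl_insert_preserves_isSome ws ext l _ q
          (insertAux_lookup_isSome ws ext q w.toList [] t hpre)
      · exact ih _ w q h hpre

theorem buildTrie_good (ws ext : List String) : GoodT ws ext [] (buildTrie ws ext) := by
  unfold buildTrie
  have h : ∀ (l : List String) (t : Trie), GoodT ws ext [] t →
      GoodT ws ext [] (l.foldl (fun t w => insertAux ws ext [] w.toList t) t) := by
    intro l
    induction l with
    | nil => intro t h; simpa using h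
    | cons w l ih => intro t h; exact ih _ (insertAux_good ws ext w.toList [] t h)
  exact h ext _ (goodT_newNode ws ext [])

theorem buildTrie_presence (ws ext : List String) (w : String) (q : List Char)
    (hmem : w ∈ ext) (hpre : q <+: w.toList) :
    (lookupT (buildTrie ws ext) q).isSome :=
  foldl_insert_presence ws ext ext _ w q hmem hpre

-- the central simulation: A's fold over (count, word, best) and B's fold over (count, node, best)
theorem fold_sim (ws ext : List String) (troot : Trie)
    (hgood : GoodT ws ext [] troot)
    (hpres : ∀ (w : String) (q : List Char), w ∈ ext → q <+: w.toList → (lookupT troot q).isSome) :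
    ∀ (cs : List Char) (count best : Int) (word : List Char) (node : Trie),
      lookupT troot word = some node →
      (cs.foldl (stepA ws ext) (count, word, best)).1 =
      (cs.foldl (stepB troot) (count, node, best)).1 := by
  intro cs
  induction cs with
  | nil => intro count best word node _; rfl
  | cons c cs ih =>
      intro count best word node hlk
      have hstep : lookupT troot (word ++ [c]) = getKid node.kids c := by
        rw [lookupT_append_singleton, hlk]; rfl
      simp only [List.foldl_cons]
      cases hgk : getKid node.kids c with
      | none =>
          -- word ++ [c] has no trie node, hence it is not in the extended set
          have hnm : String.ofList (word ++ [c]) ∉ ext := by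
            intro hmem
            have hs := hpres (String.ofList (word ++ [c])) (word ++ [c]) hmem (by simp)
            rw [hstep, hgk] at hs
            simp at hs
          have hnm2 : String.ofList word ++ String.ofList [c] ∉ ext := by simpa using hnm
          have hA : stepA ws ext (count, word, best) c = (count + best ^ 2, ([] : List Char), 0) := by
            simp [stepA, hnm2]
          have hB : stepB troot (count, node, best) c = (count + best * best, troot, 0) := by
            simp [stepB, hgk]
          rw [hA, hB, pow_two]
          exact ih _ _ [] troot rfl
      | some child =>
          have hchildgood : GoodT ws ext (word ++ [c]) child := by
            have := lookupT_good ws ext (word ++ [c]) [] troot hgood child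
              (by rw [hstep, hgk])
            simpa using this
          cases hchildgood with
          | mk _ e s d k he hs hd hk =>
            cases e with
            | false =>
                have hnm : String.ofList (word ++ [c]) ∉ ext :=
                  of_decide_eq_false he.symm
                have hnm2 : String.ofList word ++ String.ofList [c] ∉ ext := by simpa using hnm
                have hA : stepA ws ext (count, word, best) c = (count + best ^ 2, ([] : List Char), 0) := by
                  simp [stepA, hnm2]
                have hB : stepB troot (count, node, best) c = (count + best * best, troot, 0) := by
                  simp [stepB, hgk, Trie.inExt]
                rw [hA, hB, pow_two]
                exact ih _ _ [] troot rfl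
            | true =>
                have hmem : String.ofList (word ++ [c]) ∈ ext :=
                  of_decide_eq_true he.symm
                have hA : stepA ws ext (count, word, best) c =
                    (count, word ++ [c],
                      if String.ofList (word ++ [c]) ∈ ws then (((word ++ [c]).length : Nat) : Int) else best) := by
                  have hmem2 : String.ofList word ++ String.ofList [c] ∈ ext := by simpa using hmem
                  simp [stepA, hmem2]
                have hB : stepB troot (count, node, best) c =
                    (count, Trie.mk true s d k, if s = true then d else best) := by
                  simp [stepB, hgk, Trie.inExt, Trie.inSet, Trie.depth]
                have hif : (if s = true then d else best) =
                    (if String.ofList (word ++ [c]) ∈ ws then (((word ++ [c]).length : Nat) : Int) else best) := by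
                  rw [hs, hd]
                  by_cases hw : String.ofList (word ++ [c]) ∈ ws
                  · have hw2 : String.ofList word ++ String.ofList [c] ∈ ws := by simpa using hw
                    simp [hw2]
                  · have hw2 : String.ofList word ++ String.ofList [c] ∉ ws := by simpa using hw
                    simp [hw2]
                rw [hA, hB, hif]
                exact ih _ _ (word ++ [c]) (Trie.mk true s d k) (by rw [hstep, hgk])

-- ===== VERDICT (by name: the statement is the Claim_ definition above) =====
theorem text_is_english_fast_spec : Claim_equal_text_is_english_fast := by
  intro text ws ext _
  unfold Spec_text_is_english_fast text_is_english_fast text_is_english_fast_alt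
  exact fold_sim ws ext (buildTrie ws ext) (buildTrie_good ws ext)
    (fun w q hm hp => buildTrie_presence ws ext w q hm hp)
    (text.toList ++ [' ']) 0 0 [] (buildTrie ws ext) rfl
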